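-- pv_equiv track=rewrite | github.com/micahkberg/Advent-of-Code-2023 | Day-12.py | remake_str
-- ===== SOURCE A (Python) =====
-- def remake_str(old_str, repl_tupl):
--     # for part 1, places ther iter object into the spring string area
--     new_str = ""
--     j = 0
--     for char in old_str:
--         if char == "?":
--             if repl_tupl[j]:
--                 new_str += "#"
--             else:
--                 new_str += "."
--             j += 1
--         else:
--             new_str += char
--     return new_str
-- ===== SOURCE B (Python) =====
-- def remake_str(old_str, repl_tupl):
--     # split on '?', build all fill chars up front, then stitch fills and tail parts with zip
--     parts = old_str.split('?')
--     fills = ['#' if repl_tupl[i] else '.' for i in range(len(parts) - 1)]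
--     return parts[0] + ''.join(f + p for f, p in zip(fills, parts[1:]))
-- ===== Notes on version B (the rewrite author's own statement) =====
-- stated objective: faster
-- what changed: B splits the string on '?' once, precomputes the list of fill characters from repl_tupl, and stitches fills and fixed segments together with zip and ''.join, instead of walking every character with a manual '?' counter and per-character string += concatenation.
import Mathlib
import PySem

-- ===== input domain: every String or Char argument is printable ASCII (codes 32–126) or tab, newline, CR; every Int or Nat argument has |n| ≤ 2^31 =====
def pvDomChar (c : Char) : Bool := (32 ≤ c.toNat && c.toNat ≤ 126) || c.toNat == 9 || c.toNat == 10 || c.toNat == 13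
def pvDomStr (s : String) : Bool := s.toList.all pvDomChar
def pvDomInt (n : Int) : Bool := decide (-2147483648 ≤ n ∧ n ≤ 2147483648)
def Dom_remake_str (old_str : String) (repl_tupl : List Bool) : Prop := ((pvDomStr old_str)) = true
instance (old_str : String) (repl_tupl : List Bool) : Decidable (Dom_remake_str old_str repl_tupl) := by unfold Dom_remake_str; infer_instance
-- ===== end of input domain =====

-- B replaces A's per-character walk (manual '?' counter, string +=) by one split on '?',
-- a precomputed list of fill characters, and a zip/flatten stitch (alternative decomposition).


-- ===== PORT A =====
-- A's loop over the characters: j counts the '?' seen so far; repl_tupl[j] is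
-- PySem.List.pyGet? (none = IndexError, excluded by Pre_; .getD false only pads totality there).
def remakeGoA (cs : List Char) (repl : List Bool) (j : Int) : List Char :=
  match cs with
  | [] => []
  | c :: rest =>
    if c = '?' then
      (if (PySem.List.pyGet? repl j).getD false then '#' else '.') :: remakeGoA rest repl (j + 1)
    else
      c :: remakeGoA rest repl j

def remake_str (old_str : String) (repl_tupl : List Bool) : String :=
  String.mk (remakeGoA old_str.toList repl_tupl 0)

-- ===== PORT B =====
-- B: parts = split on '?'; fills = the chosen char for each gap (repl_tupl[i] is pyGet?,
-- none = IndexError excluded by Pre_, .getD false only pads totality); result is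
-- parts[0] (headI: split never returns an empty list) plus the zip of fills with parts[1:].
def remake_str_alt (old_str : String) (repl_tupl : List Bool) : String :=
  let parts := old_str.toList.splitOn '?'
  let fills := (PySem.List.pyRange 0 ((parts.length : Int) - 1) 1).map
      (fun i => if (PySem.List.pyGet? repl_tupl i).getD false then '#' else '.')
  String.mk (parts.headI ++ (List.zipWith (fun f p => f :: p) fills parts.tail).flatten)

-- ===== PRECONDITION & SPEC =====
-- Pre_ excludes exactly the inputs where Python A raises IndexError (more '?' than booleans);
-- Python B raises IndexError there too.
def Pre_remake_str (old_str : String) (repl_tupl : List Bool) : Prop :=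
  old_str.toList.count '?' ≤ repl_tupl.length

instance (old_str : String) (repl_tupl : List Bool) : Decidable (Pre_remake_str old_str repl_tupl) := by
  unfold Pre_remake_str; infer_instance

def pvWitness_remake_str : String × List Bool := ("?a?b", [true, false])

def Spec_remake_str (old_str : String) (repl_tupl : List Bool) (out : String) : Prop := out = remake_str_alt old_str repl_tupl
instance (old_str : String) (repl_tupl : List Bool) (out : String) : Decidable (Spec_remake_str old_str repl_tupl out) := by unfold Spec_remake_str; infer_instance

-- ===== CLAIM (what is proved, stated in full; the proofs are below) =====
def Claim_equal_remake_str : Prop := ∀ (old_str : String) (repl_tupl : List Bool), Dom_remake_str old_str repl_tupl → Pre_remake_str old_str repl_tupl → Spec_remake_str old_str repl_tupl (remake_str old_str repl_tupl)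

-- ===== LEMMAS AND PROOFS =====

-- The stitch of B (headI + zip of fills with the tail parts), with the fill index offset by j,
-- equals A's counter walk started at j.
theorem remake_key (repl : List Bool) (cs : List Char) : ∀ (j : Nat),
    (cs.splitOnP (· == '?')).headI ++
      (List.zipWith (fun f p => f :: p)
        ((List.range ((cs.splitOnP (· == '?')).length - 1)).map
          (fun k => if (PySem.List.pyGet? repl ((j + k : Nat) : Int)).getD false then '#' else '.'))
        (cs.splitOnP (· == '?')).tail).flatten
      = remakeGoA cs repl (j : Int) := by
  induction cs with
  | nil => intro j; simp [remakeGoA, List.splitOnP_nil]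
  | cons c rest ih =>
    intro j
    rw [List.splitOnP_cons]
    rcases h : rest.splitOnP (· == '?') with _ | ⟨q0, qs⟩
    · exact absurd h (List.splitOnP_ne_nil _ _)
    · by_cases hc : c = '?'
      · have h2 := ih (j + 1)
        rw [h] at h2
        simp only [List.headI, List.tail, List.length_cons, Nat.add_sub_cancel] at h2
        have hmap : (List.range qs.length).map
              ((fun k => if (PySem.List.pyGet? repl ((j + k : Nat) : Int)).getD false then '#' else '.') ∘ Nat.succ)
            = (List.range qs.length).map
              (fun k => if (PySem.List.pyGet? repl ((j + 1 + k : Nat) : Int)).getD false then '#' else '.') := by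
          apply List.map_congr_left
          intro k _
          have : j + Nat.succ k = j + 1 + k := by omega
          simp only [Function.comp, this]
        simp only [hc, beq_self_eq_true, if_true, List.headI, List.tail, List.length_cons,
          Nat.add_sub_cancel, List.range_succ_eq_map, List.map_cons, List.map_map,
          List.zipWith_cons_cons, List.flatten_cons, List.nil_append, Nat.add_zero]
        rw [hmap]
        rw [remakeGoA]
        have hcast : ((j : Int) + 1) = ((j + 1 : Nat) : Int) := by push_cast; ring
        rw [List.cons_append, hcast, ← h2]
        simp
      · have h2 := ih j
        rw [h] at h2
        simp only [List.headI, List.tail, List.length_cons, Nat.add_sub_cancel] at h2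
        have hbeq : (c == '?') = false := beq_eq_false_iff_ne.mpr hc
        simp only [hbeq, Bool.false_eq_true, if_false, List.modifyHead_cons, List.headI,
          List.tail, List.length_cons, Nat.add_sub_cancel]
        rw [remakeGoA]
        simp only [if_neg hc]
        rw [List.cons_append, h2]

-- ===== VERDICT (by name: the statement is the Claim_ definition above) =====
theorem remake_str_spec : Claim_equal_remake_str := by
  intro old_str repl _ _
  unfold Spec_remake_str remake_str remake_str_alt
  have hsplit : old_str.toList.splitOn '?' = old_str.toList.splitOnP (· == '?') := rfl
  simp only [hsplit]
  have hrange : PySem.List.pyRange 0 (((old_str.toList.splitOnP (· == '?')).length : Int) - 1) 1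
      = (List.range ((old_str.toList.splitOnP (· == '?')).length - 1)).map (fun k => ((k : Nat) : Int)) := by
    rw [PySem.List.pyRange_one]
    have : ((((old_str.toList.splitOnP (· == '?')).length : Int) - 1) - 0).toNat
        = (old_str.toList.splitOnP (· == '?')).length - 1 := by omega
    rw [this]
    apply List.map_congr_left
    intro k _
    simp
  rw [hrange, List.map_map]
  have key := remake_key repl old_str.toList 0
  simp only [Nat.zero_add, Nat.cast_zero] at key
  exact congrArg String.mk key.symm
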